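-- pv_equiv track=rewrite | github.com/donggyushin/coding-test | heap/spicy1.py | solution
-- ===== SOURCE A (Python) =====
-- from typing import List
--
-- def isShouldUpdate(scoville: List[int], K: int) -> bool:
--     result = False
--
--     for item in scoville:
--         if item < K:
--             result = True
--             break
--
--     return result
--
-- def update(scoville: List[int]) -> List[int]:
--     scoville.sort()
--     first = scoville.pop(0)
--     second = scoville.pop(0)
--     new = first + (second * 2)
--     scoville.insert(0, new)
--     return scoville
--
-- def solution(scoville, K):
--     answer = 0
--
--     while isShouldUpdate(scoville, K):
--
--         if scoville.__len__() <= 1: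
--             answer = -1
--             break
--
--         scoville = update(scoville)
--         answer += 1
--
--     return answer
-- ===== SOURCE B (Python) =====
-- def solution(scoville, K):
--     s = sorted(scoville, reverse=True)  # descending: smallest at the end
--     answer = 0
--     while s and s[-1] < K:
--         if len(s) == 1:
--             return -1
--         a = s.pop()
--         b = s.pop()
--         new = a + b * 2
--         lo = 0
--         hi = len(s)
--         while lo < hi:
--             mid = (lo + hi) // 2
--             if s[mid] >= new:
--                 lo = mid + 1
--             else:
--                 hi = mid
--         s.insert(lo, new)
--         answer += 1
--     return answer
-- ===== Notes on version B (the rewrite author's own statement) =====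
-- stated objective: faster
-- what changed: B sorts once in descending order and then keeps the list sorted, popping the two smallest from the end in O(1) and re-inserting each combined value at a position found by a hand-written binary search, replacing A's full re-sort plus a whole-list membership scan and two pop(0) shifts on every iteration.
import Mathlib
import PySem

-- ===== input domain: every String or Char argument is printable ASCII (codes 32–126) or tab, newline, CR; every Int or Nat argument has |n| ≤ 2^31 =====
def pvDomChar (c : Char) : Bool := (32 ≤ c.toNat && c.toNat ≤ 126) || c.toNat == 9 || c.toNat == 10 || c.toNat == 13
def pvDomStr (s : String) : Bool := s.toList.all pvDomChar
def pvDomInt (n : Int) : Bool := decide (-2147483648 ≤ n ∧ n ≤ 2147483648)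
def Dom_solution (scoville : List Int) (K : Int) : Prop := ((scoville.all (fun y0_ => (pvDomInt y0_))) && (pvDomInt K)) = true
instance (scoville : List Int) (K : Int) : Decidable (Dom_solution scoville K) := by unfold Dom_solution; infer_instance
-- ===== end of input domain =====

-- B sorts once (descending), pops the two smallest from the end and re-inserts each combined value
-- via a binary search, instead of A's re-sort every round. Equality is about the RETURN value only:
-- Python A mutates the caller's list in place, B does not.

-- ===== PORT A =====
-- for item in scoville: if item < K: result = True; break
def isShouldUpdate : List Int → Int → Bool
  | [], _ => false
  | x :: xs, K => if x < K then true else isShouldUpdate xs K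

-- scoville.sort(); first = pop(0); second = pop(0); insert(0, first + second*2)
-- (solution only calls this with length ≥ 2, so the pops never raise; the
--  fall-through branch below is unreachable from solution)
def updateA (scoville : List Int) : List Int :=
  match PySem.List.sorted scoville (fun x => x) false with
  | first :: second :: rest => (first + second * 2) :: rest
  | s => s

theorem updateA_length_lt (s : List Int) (h : 2 ≤ s.length) :
    (updateA s).length < s.length := by
  unfold updateA
  have hp := PySem.List.sorted_perm s (fun x : Int => x) false
  have hl : (PySem.List.sorted s (fun x : Int => x) false).length = s.length := hp.length_eq
  match hm : PySem.List.sorted s (fun x : Int => x) false with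
  | [] => rw [hm] at hl; simp at hl; omega
  | [a] => rw [hm] at hl; simp at hl; omega
  | a :: b :: rest => rw [hm] at hl; simp at hl ⊢; omega

def solutionLoop (scoville : List Int) (K : Int) (answer : Int) : Int :=
  if isShouldUpdate scoville K then
    if scoville.length ≤ 1 then -1
    else solutionLoop (updateA scoville) K (answer + 1)
  else answer
termination_by scoville.length
decreasing_by exact updateA_length_lt scoville (by omega)

def solution (scoville : List Int) (K : Int) : Int :=
  solutionLoop scoville K 0

-- ===== PORT B =====
-- while lo < hi: mid = (lo+hi)//2; if s[mid] >= new: lo = mid+1 else: hi = mid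
-- (only called with hi ≤ len(s), so s[mid] is always in range; getD's default is never used)
def bsearchB (s : List Int) (new : Int) (lo hi : Nat) : Nat :=
  if lo < hi then
    let mid := (lo + hi) / 2
    if new ≤ s.getD mid 0 then bsearchB s new (mid + 1) hi
    else bsearchB s new lo mid
  else lo
termination_by hi - lo
decreasing_by all_goals omega

-- while s and s[-1] < K: if len(s)==1: return -1; a=s.pop(); b=s.pop(); insert the combination
def solLoopB (s : List Int) (K : Int) (answer : Int) : Int :=
  if hne : s = [] then answer
  else
    let a := s.getLast?.getD 0
    if a < K then
      if h1 : s.length = 1 then -1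
      else
        let s1 := s.dropLast
        let b := s1.getLast?.getD 0
        let s2 := s1.dropLast
        let new := a + b * 2
        let lo := bsearchB s2 new 0 s2.length
        solLoopB (PySem.List.insert s2 (lo : Int) new) K (answer + 1)
    else answer
termination_by s.length
decreasing_by
  have h2 : 1 ≤ s.length := List.length_pos_of_ne_nil hne
  simp [PySem.List.length_insert]
  omega

def solution_alt (scoville : List Int) (K : Int) : Int :=
  solLoopB (PySem.List.sorted scoville (fun x => x) true) K 0

-- ===== PRECONDITION & SPEC =====
def Spec_solution (scoville : List Int) (K : Int) (out : Int) : Prop := out = solution_alt scoville K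
instance (scoville : List Int) (K : Int) (out : Int) : Decidable (Spec_solution scoville K out) := by unfold Spec_solution; infer_instance

-- ===== CLAIM (what is proved, stated in full; the proofs are below) =====
def Claim_equal_solution : Prop := ∀ (scoville : List Int) (K : Int), Dom_solution scoville K → Spec_solution scoville K (solution scoville K)

-- ===== LEMMAS AND PROOFS =====

-- a proof-only reference loop: the merge process on the ASCENDING sorted list
def orderedInsertB : List Int → Int → List Int
  | [], v => [v]
  | x :: xs, v => if x ≤ v then x :: orderedInsertB xs v else v :: x :: xs

theorem orderedInsertB_length (xs : List Int) (v : Int) :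
    (orderedInsertB xs v).length = xs.length + 1 := by
  induction xs with
  | nil => rfl
  | cons x xs ih => simp only [orderedInsertB]; split <;> simp [ih]

def ascLoop (s : List Int) (K : Int) (answer : Int) : Int :=
  match s with
  | [] => answer
  | x :: rest =>
    if x < K then
      match rest with
      | [] => -1
      | y :: rest2 => ascLoop (orderedInsertB rest2 (x + y * 2)) K (answer + 1)
    else answer
termination_by s.length
decreasing_by simp [orderedInsertB_length]

-- isShouldUpdate is the 'some element < K' test
theorem isShouldUpdate_iff (s : List Int) (K : Int) :
    isShouldUpdate s K = true ↔ ∃ x ∈ s, x < K := by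
  induction s with
  | nil => simp [isShouldUpdate]
  | cons x xs ih =>
    simp only [isShouldUpdate]
    by_cases h : x < K <;> simp [h, ih]

theorem orderedInsertB_perm (xs : List Int) (v : Int) :
    (orderedInsertB xs v).Perm (v :: xs) := by
  induction xs with
  | nil => simp [orderedInsertB]
  | cons x xs ih =>
    simp only [orderedInsertB]
    split
    · exact ((ih.cons x).trans (List.Perm.swap v x xs))
    · exact List.Perm.refl _

theorem orderedInsertB_pairwise (xs : List Int) (v : Int)
    (h : xs.Pairwise (· ≤ ·)) : (orderedInsertB xs v).Pairwise (· ≤ ·) := by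
  induction xs with
  | nil => simp [orderedInsertB]
  | cons x xs ih =>
    simp only [orderedInsertB]
    rcases List.pairwise_cons.mp h with ⟨hx, hxs⟩
    split
    · refine List.pairwise_cons.mpr ⟨?_, ih hxs⟩
      intro y hy
      rcases List.mem_cons.mp ((orderedInsertB_perm xs v).mem_iff.mp hy) with heq | hy'
      · omega
      · exact hx y hy'
    · refine List.pairwise_cons.mpr ⟨?_, h⟩
      intro y hy
      rcases List.mem_cons.mp hy with heq | hy'
      · omega
      · have := hx y hy'; omega

-- inserting into the sorted tail IS re-sorting the combined list
theorem sorted_cons_eq_orderedInsertB (rest : List Int) (v : Int)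
    (h : rest.Pairwise (· ≤ ·)) :
    PySem.List.sorted (v :: rest) (fun x => x) false = orderedInsertB rest v := by
  exact PySem.List.sorted_id_eq_of_perm_of_pairwise (v :: rest) (orderedInsertB rest v)
    (orderedInsertB_perm rest v) (orderedInsertB_pairwise rest v h)

-- A's loop equals the reference loop on the ascending sorted list
theorem loop_eq (n : Nat) : ∀ (s : List Int) (K answer : Int), s.length = n →
    solutionLoop s K answer =
      ascLoop (PySem.List.sorted s (fun x => x) false) K answer := by
  induction n using Nat.strong_induction_on with
  | _ n ih =>
    intro s K answer hn
    have hp := PySem.List.sorted_perm s (fun x : Int => x) false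
    have hl : (PySem.List.sorted s (fun x : Int => x) false).length = s.length := hp.length_eq
    have hpw := PySem.List.sorted_pairwise s (fun x : Int => x)
    rw [solutionLoop]
    match hm : PySem.List.sorted s (fun x : Int => x) false with
    | [] =>
      have hs : s = [] := by
        have := hm ▸ hp; exact (List.Perm.nil_eq this).symm
      subst hs
      simp [isShouldUpdate, ascLoop]
    | x :: rest =>
      rw [hm] at hp hl hpw
      have hmin : ∀ y ∈ s, x ≤ y := PySem.List.key_head_sorted_le s (fun x : Int => x) hm
      by_cases hxK : x < K
      · have hshould : isShouldUpdate s K = true := by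
          rw [isShouldUpdate_iff]
          exact ⟨x, hp.mem_iff.mp (by simp), hxK⟩
        rw [if_pos hshould]
        match rest with
        | [] =>
          have hle : s.length ≤ 1 := by simp at hl; omega
          rw [if_pos hle]
          simp [ascLoop, hxK]
        | y :: rest2 =>
          have hlen : ¬ s.length ≤ 1 := by simp at hl; omega
          rw [if_neg hlen]
          conv_rhs => rw [ascLoop]
          rw [if_pos hxK]
          have hupd : updateA s = (x + y * 2) :: rest2 := by
            unfold updateA; rw [hm]
          rw [hupd]
          have htail : rest2.Pairwise (fun a b : Int => a ≤ b) :=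
            (List.pairwise_cons.mp (List.pairwise_cons.mp hpw).2).2
          have := ih ((x + y * 2) :: rest2).length (by simp at hl ⊢; omega)
            ((x + y * 2) :: rest2) K (answer + 1) rfl
          rw [this, sorted_cons_eq_orderedInsertB rest2 (x + y * 2) htail]
      · have hshould : isShouldUpdate s K = false := by
          rw [Bool.eq_false_iff]
          intro hc
          rcases (isShouldUpdate_iff s K).mp hc with ⟨z, hz, hzK⟩
          have := hmin z hz
          simp at this
          omega
        rw [if_neg (by simp [hshould])]
        conv_rhs => rw [ascLoop.eq_def]
        simp [hxK]

-- PySem.List.insert at a nonnegative in-range index is take/cons/drop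
theorem insert_natCast (xs : List Int) (i : Nat) (v : Int) (h : i ≤ xs.length) :
    PySem.List.insert xs (i : Int) v = xs.take i ++ v :: xs.drop i := by
  unfold PySem.List.insert PySem.List.sliceIndices
  have h1 : ¬ ((1 : Int) < 0) := by omega
  have h2 : ¬ ((i : Int) < 0) := by omega
  simp only [h1, if_false, h2]
  have h3 : (min (i : Int) (xs.length : Int)).toNat = i := by omega
  simp [h3]

-- elements of a descending list are antitone in the index
theorem desc_mono (d : List Int) (hd : d.Pairwise (fun a b => b ≤ a))
    (i j : Nat) (hij : i ≤ j) (hj : j < d.length) : d[j] ≤ d[i]'(by omega) := by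
  rcases Nat.lt_or_ge i j with hlt | hge
  · exact (List.pairwise_iff_getElem.mp hd) i j (by omega) hj hlt
  · have : i = j := by omega
    subst this; exact le_refl _

-- binary-search invariant: everything left of the result is ≥ new, everything right of it is < new
theorem bsearch_inv (d : List Int) (new : Int) (hd : d.Pairwise (fun a b => b ≤ a)) :
    ∀ (n lo hi : Nat), hi - lo = n → lo ≤ hi → hi ≤ d.length →
    (∀ i (hi' : i < d.length), i < lo → new ≤ d[i]) →
    (∀ i (hi' : i < d.length), hi ≤ i → d[i] < new) →
    bsearchB d new lo hi ≤ hi ∧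
    (∀ i (hi' : i < d.length), i < bsearchB d new lo hi → new ≤ d[i]) ∧
    (∀ i (hi' : i < d.length), bsearchB d new lo hi ≤ i → d[i] < new) := by
  intro n
  induction n using Nat.strong_induction_on with
  | _ n ih =>
    intro lo hi hn hlh hhl hlow hhigh
    rw [bsearchB]
    by_cases hlt : lo < hi
    · rw [if_pos hlt]
      have hmidlt : (lo + hi) / 2 < d.length := by omega
      have hgd : d.getD ((lo + hi) / 2) 0 = d[(lo + hi) / 2] := List.getD_eq_getElem d 0 hmidlt
      by_cases hc : new ≤ d.getD ((lo + hi) / 2) 0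
      · simp only [hc, if_true]
        have hlow' : ∀ i (hi' : i < d.length), i < (lo + hi) / 2 + 1 → new ≤ d[i] := by
          intro i hi' hilt
          calc new ≤ d[(lo + hi) / 2] := hgd ▸ hc
            _ ≤ d[i] := desc_mono d hd i ((lo + hi) / 2) (by omega) hmidlt
        exact ih (hi - ((lo + hi) / 2 + 1)) (by omega) ((lo + hi) / 2 + 1) hi rfl
          (by omega) hhl hlow' hhigh
      · simp only [hc, if_false]
        have hhigh' : ∀ i (hi' : i < d.length), (lo + hi) / 2 ≤ i → d[i] < new := by
          intro i hi' hle
          have := desc_mono d hd ((lo + hi) / 2) i hle hi'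
          rw [hgd] at hc
          omega
        obtain ⟨h1, h2, h3⟩ := ih ((lo + hi) / 2 - lo) (by omega) lo ((lo + hi) / 2) rfl
          (by omega) (by omega) hlow hhigh'
        exact ⟨by omega, h2, h3⟩
    · rw [if_neg hlt]
      have : lo = hi := by omega
      subst this
      exact ⟨le_refl _, hlow, fun i hi' hge => hhigh i hi' hge⟩

-- inserting at the binary-search position in the descending list is
-- the reverse of an ordered insert into the ascending list
theorem desc_insert_eq (rest2 : List Int) (new : Int)
    (h : rest2.Pairwise (· ≤ ·)) :
    PySem.List.insert rest2.reverse ((bsearchB rest2.reverse new 0 rest2.reverse.length : Nat) : Int) new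
      = (orderedInsertB rest2 new).reverse := by
  set d := rest2.reverse with hdvar
  have hd : d.Pairwise (fun a b => b ≤ a) := by
    rw [hdvar, List.pairwise_reverse]; exact h
  obtain ⟨hle, hlft, hrgt⟩ := bsearch_inv d new hd d.length 0 d.length rfl (by omega) (le_refl _)
    (by omega) (by intro i hi' hge; omega)
  set lo := bsearchB d new 0 d.length with hlovar
  rw [insert_natCast d lo new hle]
  -- the inserted list is descending and a permutation of new :: d, like the RHS reversed
  apply List.eq_of_perm_of_sorted (le := fun a b : Int => b ≤ a)
    (fun a b _ _ h1 h2 => le_antisymm h2 h1)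
  · -- Pairwise of take lo d ++ new :: drop lo d
    rw [List.pairwise_append]
    refine ⟨hd.sublist (List.take_sublist lo d), ?_, ?_⟩
    · rw [List.pairwise_cons]
      refine ⟨?_, hd.sublist (List.drop_sublist lo d)⟩
      intro b hb
      rcases List.mem_iff_getElem.mp hb with ⟨k, hk, hbk⟩
      rw [List.getElem_drop] at hbk
      have hk' : lo + k < d.length := by
        have := hk; simp [List.length_drop] at this; omega
      have := hrgt (lo + k) hk' (by omega)
      omega
    · intro a ha b hb
      rcases List.mem_iff_getElem.mp ha with ⟨k, hk, hak⟩
      have hklen : k < d.length := by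
        have := List.length_take_le lo d; simp at hk; omega
      rw [List.getElem_take] at hak
      have hklo : k < lo := by simp at hk; omega
      have hna : new ≤ a := hak ▸ hlft k hklen hklo
      rcases List.mem_cons.mp hb with rfl | hb'
      · exact hna
      · rcases List.mem_iff_getElem.mp hb' with ⟨m, hm, hbm⟩
        rw [List.getElem_drop] at hbm
        have hm' : lo + m < d.length := by
          have := hm; simp [List.length_drop] at this; omega
        have := hrgt (lo + m) hm' (by omega)
        omega
  · rw [List.pairwise_reverse]
    exact orderedInsertB_pairwise rest2 new h
  · have p1 : (List.take lo d ++ new :: List.drop lo d).Perm (new :: d) := by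
      have h := List.perm_middle (a := new) (l₁ := List.take lo d) (l₂ := List.drop lo d)
      rw [List.take_append_drop] at h
      exact h
    have p2 : (new :: d).Perm (new :: rest2) := by
      rw [hdvar]; exact List.Perm.cons new (List.reverse_perm rest2)
    exact p1.trans (p2.trans ((orderedInsertB_perm rest2 new).symm.trans
      (List.reverse_perm _).symm))

-- B's descending loop equals the reference ascending loop
theorem desc_eq (n : Nat) : ∀ (l : List Int) (K answer : Int), l.length = n →
    l.Pairwise (· ≤ ·) →
    solLoopB l.reverse K answer = ascLoop l K answer := by
  induction n using Nat.strong_induction_on with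
  | _ n ih =>
    intro l K answer hn hpw
    match l with
    | [] => simp [solLoopB, ascLoop]
    | x :: rest =>
      rw [solLoopB.eq_def]
      rw [dif_neg (show ¬ (x :: rest).reverse = [] by simp)]
      simp only [List.reverse_cons, List.getLast?_concat, Option.getD_some]
      conv_rhs => rw [ascLoop.eq_def]
      by_cases hxK : x < K
      · simp only [if_pos hxK]
        match rest with
        | [] =>
          simp
        | y :: rest2 =>
          rw [dif_neg (show ¬ ((y :: rest2).reverse ++ [x]).length = 1 by
            simp)]
          simp only [List.reverse_cons, List.dropLast_concat, List.getLast?_concat,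
            Option.getD_some]
          have htail : rest2.Pairwise (fun a b : Int => a ≤ b) :=
            (List.pairwise_cons.mp (List.pairwise_cons.mp hpw).2).2
          rw [desc_insert_eq rest2 (x + y * 2) htail]
          have hlen2 : (orderedInsertB rest2 (x + y * 2)).length < n := by
            rw [orderedInsertB_length]; simp at hn; omega
          exact ih _ hlen2 (orderedInsertB rest2 (x + y * 2)) K (answer + 1) rfl
            (orderedInsertB_pairwise rest2 (x + y * 2) htail)
      · simp [hxK]

-- reverse=True sorting of ints is the reverse of the ascending sort
theorem sorted_rev_eq (xs : List Int) :
    PySem.List.sorted xs (fun x => x) true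
      = (PySem.List.sorted xs (fun x => x) false).reverse := by
  apply List.eq_of_perm_of_sorted (le := fun a b : Int => b ≤ a)
    (fun a b _ _ h1 h2 => le_antisymm h2 h1)
  · exact PySem.List.sorted_pairwise_rev xs (fun x => x)
  · rw [List.pairwise_reverse]
    exact PySem.List.sorted_pairwise xs (fun x => x)
  · exact (PySem.List.sorted_perm xs (fun x => x) true).trans
      ((PySem.List.sorted_perm xs (fun x => x) false).symm.trans
        (List.reverse_perm _).symm)

-- ===== VERDICT (by name: the statement is the Claim_ definition above) =====
theorem solution_spec : Claim_equal_solution := by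
  intro scoville K _
  unfold Spec_solution solution solution_alt
  rw [loop_eq scoville.length scoville K 0 rfl, sorted_rev_eq]
  exact (desc_eq (PySem.List.sorted scoville (fun x => x) false).length _ K 0 rfl
    (PySem.List.sorted_pairwise scoville (fun x : Int => x))).symm
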